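-- pv_equiv track=rewrite | github.com/Jalynn-X/cs61a-2020 | lab/lab04/lab04/lab04.py | add_chars
-- ===== SOURCE A (Python) =====
-- def add_chars(w1, w2):
--     """
--     Return a string containing the characters you need to add to w1 to get w2.
--
--     You may assume that w1 is a subsequence of w2.
--
--     >>> add_chars("owl", "howl")
--     'h'
--     >>> add_chars("want", "wanton")
--     'on'
--     >>> add_chars("rat", "radiate")
--     'diae'
--     >>> add_chars("a", "prepare")
--     'prepre'
--     >>> add_chars("resin", "recursion")
--     'curo'
--     >>> add_chars("fin", "effusion")
--     'efuso'
--     >>> add_chars("coy", "cacophony")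
--     'acphon'
--     >>> from construct_check import check
--     >>> # ban iteration and sets
--     >>> check(LAB_SOURCE_FILE, 'add_chars',
--     ...       ['For', 'While', 'Set', 'SetComp']) # Must use recursion
--     True
--     """
--     "*** YOUR CODE HERE ***"
--     if len(w1) == 0:
--         return w2
--     else:
--         if w1[0] == w2[0]:
--             return add_chars(w1[1:], w2[1:])
--         else:
--             return w2[0] + add_chars(w1, w2[1:])
-- ===== SOURCE B (Python) =====
-- def add_chars(w1, w2):
--     # Single pass over w2 with an index into w1: greedily consume matching
--     # characters of w1, collect everything else.
--     i = 0
--     out = []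
--     for c in w2:
--         if i < len(w1) and c == w1[i]:
--             i += 1
--         else:
--             out.append(c)
--     return ''.join(out)
-- ===== Notes on version B (the rewrite author's own statement) =====
-- stated objective: faster
-- what changed: Replaced the O(n^2) recursion with per-call string slicing and concatenation by a single iterative two-pointer pass over w2 that collects unmatched characters into a list joined once.
import Mathlib
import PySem

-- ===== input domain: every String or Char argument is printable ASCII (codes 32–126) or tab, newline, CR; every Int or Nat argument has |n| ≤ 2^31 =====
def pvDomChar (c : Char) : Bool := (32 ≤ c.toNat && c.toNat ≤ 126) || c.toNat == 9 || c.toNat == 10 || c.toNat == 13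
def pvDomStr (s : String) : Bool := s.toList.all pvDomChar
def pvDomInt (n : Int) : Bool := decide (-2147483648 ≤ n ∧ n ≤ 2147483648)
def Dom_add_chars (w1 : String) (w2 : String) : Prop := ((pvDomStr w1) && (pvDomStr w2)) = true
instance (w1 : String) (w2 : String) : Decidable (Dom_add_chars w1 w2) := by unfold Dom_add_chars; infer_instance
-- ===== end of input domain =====

-- B replaces A's O(n^2) slicing recursion by one iterative two-pointer pass over w2.

-- ===== PORT A =====
-- A's recursion on the two strings; the `(_ :: _, [])` case is where Python
-- raises IndexError on w2[0] (excluded by Pre_); we return [] there.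
def addCharsRecA : List Char → List Char → List Char
  | [], w2 => w2
  | _ :: _, [] => []
  | c1 :: t1, c2 :: t2 =>
    if c1 = c2 then addCharsRecA t1 t2
    else c2 :: addCharsRecA (c1 :: t1) t2

def add_chars (w1 : String) (w2 : String) : String :=
  String.mk (addCharsRecA w1.toList w2.toList)

-- ===== PORT B =====
-- one step of B's loop body: state = (i, out)
def addCharsStepB (w1 : List Char) (st : Nat × List Char) (c : Char) : Nat × List Char :=
  if st.1 < w1.length && c == w1.getD st.1 default then (st.1 + 1, st.2)
  else (st.1, st.2 ++ [c])

def add_chars_alt (w1 : String) (w2 : String) : String :=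
  String.mk (w2.toList.foldl (addCharsStepB w1.toList) (0, [])).2

-- ===== PRECONDITION & SPEC =====
-- Pre_: exactly the documented assumption; A raises IndexError outside it.
def Pre_add_chars (w1 : String) (w2 : String) : Prop := w1.toList.Sublist w2.toList
instance (w1 : String) (w2 : String) : Decidable (Pre_add_chars w1 w2) := by unfold Pre_add_chars; infer_instance
def pvWitness_add_chars : String × String := ("owl", "howl")

def Spec_add_chars (w1 : String) (w2 : String) (out : String) : Prop := out = add_chars_alt w1 w2
instance (w1 : String) (w2 : String) (out : String) : Decidable (Spec_add_chars w1 w2 out) := by unfold Spec_add_chars; infer_instance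

-- ===== CLAIM (what is proved, stated in full; the proofs are below) =====
def Claim_equal_add_chars : Prop := ∀ (w1 : String) (w2 : String), Dom_add_chars w1 w2 → Pre_add_chars w1 w2 → Spec_add_chars w1 w2 (add_chars w1 w2)

-- ===== LEMMAS AND PROOFS =====

-- B's loop started at index i, with the unmatched suffix of w1 a sublist of the
-- remaining input, appends exactly what A's recursion computes on that suffix.
theorem foldB_eq_recA (w2 : List Char) : ∀ (w1 : List Char) (i : Nat) (acc : List Char),
    List.Sublist (w1.drop i) w2 →
    (w2.foldl (addCharsStepB w1) (i, acc)).2 = acc ++ addCharsRecA (w1.drop i) w2 := by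
  induction w2 with
  | nil =>
    intro w1 i acc h
    have hd : w1.drop i = [] := List.sublist_nil.mp h
    simp [hd, addCharsRecA]
  | cons c t ih =>
    intro w1 i acc h
    rcases hd : w1.drop i with _ | ⟨c1, rest⟩
    · -- i ≥ w1.length : the guard is false, c is appended
      have hle : w1.length ≤ i := by
        by_contra hlt
        have := List.length_drop (l := w1) (i := i)
        rw [hd] at this; simp at this; omega
      have hguard : (decide (i < w1.length) && c == w1.getD i default) = false := by
        simp; intro h'; omega
      simp only [List.foldl_cons, addCharsStepB, hguard]
      rw [if_neg Bool.false_ne_true]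
      rw [ih w1 i (acc ++ [c]) (by rw [hd]; exact List.nil_sublist t)]
      simp [hd, addCharsRecA]
    · -- w1[i] = c1
      have hlt : i < w1.length := by
        by_contra hge
        rw [List.drop_eq_nil_of_le (by omega)] at hd; cases hd
      have hget : w1.getD i default = c1 := by
        have h0 : (w1.drop i).getD 0 default = c1 := by rw [hd]; rfl
        rw [List.getD_eq_getElem?_getD] at h0 ⊢
        rw [List.getElem?_drop] at h0
        simpa using h0
      have hct : List.Sublist (c1 :: rest) (c :: t) := by rw [← hd]; exact h
      by_cases hc : c = c1
      · -- match: advance i; A consumes both heads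
        have hguard : (decide (i < w1.length) && c == w1.getD i default) = true := by
          rw [hget]; simp [hlt, hc]
        simp only [List.foldl_cons, addCharsStepB, hguard]
        rw [if_pos trivial]
        have hdrop1 : w1.drop (i + 1) = rest := by
          rw [← List.tail_drop, hd]; rfl
        have hsub' : List.Sublist (w1.drop (i + 1)) t := by
          rw [hdrop1]
          cases hct with
          | cons _ h' => exact (List.sublist_cons_self c1 rest).trans h'
          | cons₂ _ h' => exact h'
        rw [ih w1 (i + 1) acc hsub']
        rw [hdrop1]
        simp [addCharsRecA, hc]
      · -- mismatch: keep i, append c; A emits c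
        have hguard : (decide (i < w1.length) && c == w1.getD i default) = false := by
          rw [hget]; simp [hc]
        simp only [List.foldl_cons, addCharsStepB, hguard]
        rw [if_neg Bool.false_ne_true]
        have hsub : List.Sublist (w1.drop i) t := by
          cases hct with
          | cons _ h' => rw [hd]; exact h'
          | cons₂ _ h' => exact absurd rfl hc
        rw [ih w1 i (acc ++ [c]) hsub]
        have hc' : ¬ c1 = c := fun e => hc e.symm
        rw [hd]
        simp [addCharsRecA, hc']

-- ===== VERDICT (by name: the statement is the Claim_ definition above) =====
theorem add_chars_spec : Claim_equal_add_chars := by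
  intro w1 w2 _ hpre
  unfold Spec_add_chars add_chars add_chars_alt
  rw [foldB_eq_recA w2.toList w1.toList 0 [] (by simpa using hpre)]
  simp
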